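-- pv_equiv track=rewrite | github.com/coursera/programming-assignments-demo | custom-graders/spreadsheet-grader/execute_grader.py | trim_cell_forumulas
-- ===== SOURCE A (Python) =====
-- def trim_cell_forumulas(forumulas):
--     def reversed_generator():
--         all_previous_empty = True
--         for row in reversed(forumulas):
--             last_col = len(row) - next((i for i, v in enumerate(reversed(row)) if len(v) > 0), len(row))
--             if last_col > 0:
--                 all_previous_empty = False
--             if not all_previous_empty:
--                 yield row[:last_col]
--     return list(reversed(list(reversed_generator())))
-- ===== SOURCE B (Python) =====
-- def trim_cell_forumulas(forumulas):
--     trimmed = []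
--     for row in forumulas:
--         last = 0
--         for i, v in enumerate(row):
--             if len(v) > 0:
--                 last = i + 1
--         trimmed.append(row[:last])
--     while trimmed and len(trimmed[-1]) == 0:
--         trimmed.pop()
--     return trimmed
-- ===== Notes on version B (the rewrite author's own statement) =====
-- stated objective: simpler
-- what changed: Replaced the reversed-order generator with its all_previous_empty sentinel and reversed per-row scan by a forward pass that trims each row after its last non-empty cell, followed by a plain while-pop of trailing empty rows.
import Mathlib
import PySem

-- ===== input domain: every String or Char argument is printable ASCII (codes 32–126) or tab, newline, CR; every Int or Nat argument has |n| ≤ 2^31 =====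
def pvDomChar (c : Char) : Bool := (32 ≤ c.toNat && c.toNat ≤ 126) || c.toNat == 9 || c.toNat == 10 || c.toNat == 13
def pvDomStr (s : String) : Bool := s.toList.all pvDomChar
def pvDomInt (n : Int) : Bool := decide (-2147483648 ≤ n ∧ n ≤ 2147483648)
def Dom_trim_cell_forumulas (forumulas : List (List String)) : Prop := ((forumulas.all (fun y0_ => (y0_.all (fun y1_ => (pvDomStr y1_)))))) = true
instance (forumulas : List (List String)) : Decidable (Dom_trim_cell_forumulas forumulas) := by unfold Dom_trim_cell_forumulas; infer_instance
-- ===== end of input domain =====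

-- B replaces A's reversed generator + all_previous_empty sentinel by a forward trim of each
-- row followed by a while-pop of trailing empty rows (objective: simpler; same return value).

-- ===== PORT A =====
-- len(v) > 0 for a cell v (shared literal test of both Pythons)
def pvCellNonEmpty (v : String) : Bool := decide (0 < PySem.Str.len v)

-- last_col = len(row) - next((i for i, v in enumerate(reversed(row)) if len(v) > 0), len(row))
def pvLastColA (row : List String) : Int :=
  (row.length : Int) - (((row.reverse.findIdx? pvCellNonEmpty).getD row.length : Nat) : Int)

-- the generator's loop: state all_previous_empty, yields collected in generator order
def pvGenA : List (List String) → Bool → List (List String)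
  | [], _ => []
  | row :: rest, ape =>
      let lastCol := pvLastColA row
      let ape' := if 0 < lastCol then false else ape
      if ape' = false then PySem.List.slice row none (some lastCol) :: pvGenA rest ape'
      else pvGenA rest ape'

def trim_cell_forumulas (forumulas : List (List String)) : List (List String) :=
  (pvGenA forumulas.reverse true).reverse

-- ===== PORT B =====
-- last = 0; for i, v in enumerate(row): if len(v) > 0: last = i + 1
def pvLastColB (row : List String) : Int :=
  (PySem.List.enumerate row).foldl (fun last iv => if pvCellNonEmpty iv.2 then iv.1 + 1 else last) 0

-- trimmed.append(row[:last])
def pvTrimRowB (row : List String) : List String :=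
  PySem.List.slice row none (some (pvLastColB row))

-- while trimmed and len(trimmed[-1]) == 0: trimmed.pop()  — run on the reversed list
def pvPopTrail : List (List String) → List (List String)
  | [] => []
  | r :: rest => if r.length = 0 then pvPopTrail rest else r :: rest

def trim_cell_forumulas_alt (forumulas : List (List String)) : List (List String) :=
  (pvPopTrail (forumulas.map pvTrimRowB).reverse).reverse

-- ===== PRECONDITION & SPEC =====
def Spec_trim_cell_forumulas (forumulas : List (List String)) (out : List (List String)) : Prop := out = trim_cell_forumulas_alt forumulas
instance (forumulas : List (List String)) (out : List (List String)) : Decidable (Spec_trim_cell_forumulas forumulas out) := by unfold Spec_trim_cell_forumulas; infer_instance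

-- ===== CLAIM (what is proved, stated in full; the proofs are below) =====
def Claim_equal_trim_cell_forumulas : Prop := ∀ (forumulas : List (List String)), Dom_trim_cell_forumulas forumulas → Spec_trim_cell_forumulas forumulas (trim_cell_forumulas forumulas)

-- ===== LEMMAS AND PROOFS =====

lemma lastB_nil : pvLastColB [] = 0 := rfl

lemma lastB_append (l : List String) (x : String) :
    pvLastColB (l ++ [x]) = if pvCellNonEmpty x then (l.length : Int) + 1 else pvLastColB l := by
  simp [pvLastColB, PySem.List.enumerate_append, PySem.List.enumerate_cons, PySem.List.enumerate_nil]

lemma lastA_eq_lastB (row : List String) : pvLastColA row = pvLastColB row := by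
  induction row using List.reverseRecOn with
  | nil => rfl
  | append_singleton l x ih =>
      rw [lastB_append, ← ih]
      simp only [pvLastColA, List.reverse_append, List.reverse_singleton, List.singleton_append,
        List.findIdx?_cons, List.length_append, List.length_singleton]
      by_cases h : pvCellNonEmpty x
      · simp [h]
      · simp only [h, Bool.false_eq_true, if_false]
        cases hf : l.reverse.findIdx? pvCellNonEmpty with
        | none => simp
        | some i => simp

lemma lastB_nonneg (row : List String) : 0 ≤ pvLastColB row := by
  induction row using List.reverseRecOn with
  | nil => simp [lastB_nil]
  | append_singleton l x ih =>
      rw [lastB_append]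
      split <;> omega

lemma lastB_le (row : List String) : pvLastColB row ≤ (row.length : Int) := by
  induction row using List.reverseRecOn with
  | nil => simp [lastB_nil]
  | append_singleton l x ih =>
      rw [lastB_append]
      simp only [List.length_append, List.length_cons, List.length_nil]
      split <;> push_cast <;> omega

lemma trimB_len_eq_zero (row : List String) : ((pvTrimRowB row).length = 0) ↔ pvLastColB row = 0 := by
  have h0 := lastB_nonneg row
  have hle := lastB_le row
  unfold pvTrimRowB
  rw [PySem.List.slice_to row h0, List.length_take]
  omega

lemma genA_false (m : List (List String)) : pvGenA m false = m.map pvTrimRowB := by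
  induction m with
  | nil => rfl
  | cons r m ih =>
      simp only [pvGenA, ite_self, List.map_cons]
      rw [lastA_eq_lastB]
      simp [ih, pvTrimRowB]

lemma genA_true (m : List (List String)) :
    pvGenA m true = (m.dropWhile (fun r => pvLastColB r == 0)).map pvTrimRowB := by
  induction m with
  | nil => rfl
  | cons r m ih =>
      simp only [pvGenA, List.dropWhile_cons]
      by_cases h : 0 < pvLastColA r
      · have hb : (pvLastColB r == 0) = false := by
          rw [← lastA_eq_lastB]; simp; omega
        simp only [h, if_pos, hb, Bool.false_eq_true, if_false, List.map_cons]
        rw [lastA_eq_lastB]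
        simp [genA_false, pvTrimRowB]
      · have hb : (pvLastColB r == 0) = true := by
          have := lastB_nonneg r
          rw [← lastA_eq_lastB] at this ⊢
          simp; omega
        simp [h, hb, ih]

lemma popTrail_eq (l : List (List String)) :
    pvPopTrail l = l.dropWhile (fun r => r.length == 0) := by
  induction l with
  | nil => rfl
  | cons r rest ih =>
      simp only [pvPopTrail, List.dropWhile_cons]
      by_cases h : r.length = 0 <;> simp [h, ih]

-- ===== VERDICT (by name: the statement is the Claim_ definition above) =====
theorem trim_cell_forumulas_spec : Claim_equal_trim_cell_forumulas := by
  intro l _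
  unfold Spec_trim_cell_forumulas trim_cell_forumulas trim_cell_forumulas_alt
  rw [genA_true, popTrail_eq]
  congr 1
  rw [← List.map_reverse, List.dropWhile_map]
  congr 2
  funext r
  have htr := trimB_len_eq_zero r
  by_cases h : pvLastColB r = 0
  · simp [Function.comp, h, htr.mpr h]
  · have h2 : (pvTrimRowB r).length ≠ 0 := fun hc => h (htr.mp hc)
    simp [Function.comp, h, h2]
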